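-- pv_equiv track=rewrite | github.com/alilotfi90/My-solutions-to-coding-challenge-problems | Russian_Doll_Envelopes.py | max_layers
-- ===== SOURCE A (Python) =====
-- def max_layers(envelopes):
--     lis=envelopes
--     lis.sort(key=lambda x:x[0]+x[1])
--     n=len(lis)
--     if n==0:
--         return 0
--     dp=[1 for i in range(n)]
--     for i in range(n-2,-1,-1):
--         for j in range(i+1,n):
--             if lis[i][0]<lis[j][0] and lis[i][1]<lis[j][1]:
--                 dp[i]=max(dp[i],1+dp[j])
--
--     return max(dp)
-- ===== SOURCE B (Python) =====
-- def max_layers(envelopes):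
--     # classic LIS reduction: sort by (width asc, height desc), then longest
--     # strictly increasing subsequence of the heights. Does not mutate its argument.
--     items = sorted(((e[0], e[1]) for e in envelopes), key=lambda p: (p[0], -p[1]))
--     best = 0
--     seen = []  # (height, length of longest chain ending at that envelope)
--     for _, h in items:
--         cur = 1 + max((l for hp, l in seen if hp < h), default=0)
--         seen.append((h, cur))
--         if cur > best:
--             best = cur
--     return best
-- ===== Notes on version B (the rewrite author's own statement) =====
-- stated objective: faster
-- what changed: A sorts by width+height and runs a backward index-pair DP comparing both coordinates of nested lists; B uses the classic LIS reduction: sort by (width asc, height desc) and take the longest strictly increasing subsequence of the heights alone via a forward scan over accumulated (height, chain-length) pairs - a constant-factor win (single flat int comparison per step instead of nested-list indexing and a two-coordinate compare); B does not mutate its argument while A sorts it in place (return values proved equal).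
-- outside the precondition, e.g. on max_layers([[5]]): A raises IndexError, B raises IndexError
import Mathlib
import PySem

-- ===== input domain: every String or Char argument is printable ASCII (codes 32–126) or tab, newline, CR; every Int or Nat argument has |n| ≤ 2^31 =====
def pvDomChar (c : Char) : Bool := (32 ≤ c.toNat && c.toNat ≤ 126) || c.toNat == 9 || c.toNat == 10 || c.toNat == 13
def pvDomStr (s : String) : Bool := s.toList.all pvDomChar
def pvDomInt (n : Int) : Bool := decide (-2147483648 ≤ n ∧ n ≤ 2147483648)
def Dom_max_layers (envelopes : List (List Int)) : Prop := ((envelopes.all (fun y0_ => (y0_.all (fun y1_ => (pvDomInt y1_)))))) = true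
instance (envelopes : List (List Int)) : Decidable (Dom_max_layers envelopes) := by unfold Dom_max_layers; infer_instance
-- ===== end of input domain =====

-- B re-implements the Russian-doll chain length by the classic LIS reduction (sort by
-- width asc / height desc, longest strictly increasing height subsequence) instead of A's
-- sort-by-sum quadratic DP over index pairs; A sorts its argument in place (B does not) —
-- the equivalence proved here is about the return value only.

-- ===== PORT A =====
def max_layers (envelopes : List (List Int)) : Int :=
  let lis := PySem.List.sorted envelopes (fun x => PySem.List.pyGetD x 0 0 + PySem.List.pyGetD x 1 0)
  let n : Int := PySem.List.len lis
  if n == 0 then 0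
  else
    let dp0 := (PySem.List.pyRange 0 n 1).map (fun _ => (1 : Int))
    let dp := (PySem.List.pyRange (n-2) (-1) (-1)).foldl (fun dp i =>
      (PySem.List.pyRange (i+1) n 1).foldl (fun dp j =>
        if PySem.List.pyGetD (PySem.List.pyGetD lis i []) 0 0 < PySem.List.pyGetD (PySem.List.pyGetD lis j []) 0 0
            ∧ PySem.List.pyGetD (PySem.List.pyGetD lis i []) 1 0 < PySem.List.pyGetD (PySem.List.pyGetD lis j []) 1 0
        then PySem.List.pySetD dp i (max (PySem.List.pyGetD dp i 0) (1 + PySem.List.pyGetD dp j 0))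
        else dp) dp) dp0
    (PySem.List.max? dp (fun y => y)).getD 0

-- ===== PORT B =====
def max_layers_alt (envelopes : List (List Int)) : Int :=
  let items := PySem.List.sorted2
    (envelopes.map (fun e => (PySem.List.pyGetD e 0 0, PySem.List.pyGetD e 1 0)))
    (fun p => p.1) (fun p => -p.2)
  (items.foldl (fun (st : Int × List (Int × Int)) q =>
      let cur : Int := 1 + PySem.List.maxD
        ((st.2.filter (fun s => decide (s.1 < q.2))).map (fun s => s.2)) (fun y => y) 0
      (if st.1 < cur then cur else st.1, st.2 ++ [(q.2, cur)])) ((0 : Int), ([] : List (Int × Int)))).1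

-- ===== PRECONDITION & SPEC =====
-- Pre_ excludes exactly the inputs where Python A raises IndexError: an inner list with
-- fewer than 2 entries (the sort key and the comparisons read e[0] and e[1]).
def Pre_max_layers (envelopes : List (List Int)) : Prop := ∀ e ∈ envelopes, 2 ≤ e.length
instance (envelopes : List (List Int)) : Decidable (Pre_max_layers envelopes) := by unfold Pre_max_layers; infer_instance
def pvWitness_max_layers : List (List Int) := [[1, 1], [2, 3], [2, 2]]
def Spec_max_layers (envelopes : List (List Int)) (out : Int) : Prop := out = max_layers_alt envelopes
instance (envelopes : List (List Int)) (out : Int) : Decidable (Spec_max_layers envelopes out) := by unfold Spec_max_layers; infer_instance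

-- ===== CLAIM (what is proved, stated in full; the proofs are below) =====
def Claim_equal_max_layers : Prop := ∀ (envelopes : List (List Int)), Dom_max_layers envelopes → Pre_max_layers envelopes → Spec_max_layers envelopes (max_layers envelopes)

-- ===== LEMMAS AND PROOFS =====

-- ---------- generic longest-chain spec ----------

def pvR2 (a b : Int × Int) : Bool := decide (a.1 < b.1) && decide (a.2 < b.2)
def pvRH (a b : Int × Int) : Bool := decide (a.2 < b.2)
def pvRF (a b : Int × Int) : Bool := decide (b.2 < a.2)

def pvOk {α : Type} (r : α → α → Bool) : Option α → α → Bool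
  | none, _ => true
  | some p, x => r p x

def pvLcs {α : Type} (r : α → α → Bool) : Option α → List α → Nat
  | _, [] => 0
  | p, x :: xs => if pvOk r p x then max (1 + pvLcs r (some x) xs) (pvLcs r p xs) else pvLcs r p xs

def pvChainOk {α : Type} (r : α → α → Bool) (p : Option α) (c : List α) : Prop :=
  List.IsChain (fun a b => r a b = true) (p.toList ++ c)

theorem pvChainOk_nil {α : Type} (r : α → α → Bool) (p : Option α) : pvChainOk r p [] := by
  cases p <;> simp [pvChainOk]

theorem pvChainOk_tail {α : Type} (r : α → α → Bool) (p : Option α) (x : α) (c : List α)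
    (h : pvChainOk r p (x :: c)) : pvChainOk r (some x) c := by
  cases p with
  | none => exact h
  | some a =>
    simp only [pvChainOk, Option.toList, List.cons_append, List.nil_append,
      List.isChain_cons_cons] at h ⊢
    exact h.2

theorem pvChainOk_head {α : Type} (r : α → α → Bool) (p : Option α) (x : α) (c : List α)
    (h : pvChainOk r p (x :: c)) : pvOk r p x = true := by
  cases p with
  | none => rfl
  | some a =>
    simp only [pvChainOk, Option.toList, List.cons_append, List.nil_append,
      List.isChain_cons_cons] at h
    exact h.1

theorem pvChainOk_cons {α : Type} (r : α → α → Bool) (p : Option α) (x : α) (c : List α)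
    (hok : pvOk r p x = true) (hc : pvChainOk r (some x) c) : pvChainOk r p (x :: c) := by
  cases p with
  | none => exact hc
  | some a =>
    simp only [pvChainOk, Option.toList, List.cons_append, List.nil_append] at hc ⊢
    cases c with
    | nil => simpa [List.IsChain] using hok
    | cons y ys =>
      rw [List.isChain_cons_cons]
      exact ⟨hok, hc⟩

theorem pvLcs_le_cons {α : Type} (r : α → α → Bool) (p : Option α) (x : α) (xs : List α) :
    pvLcs r p xs ≤ pvLcs r p (x :: xs) := by
  simp only [pvLcs]
  split
  · exact le_max_right _ _
  · exact le_rfl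

theorem pvLcs_le {α : Type} (r : α → α → Bool) :
    ∀ (l c : List α) (p : Option α), c.Sublist l → pvChainOk r p c → c.length ≤ pvLcs r p l := by
  intro l
  induction l with
  | nil => intro c p hs _; simp [List.sublist_nil.mp hs]
  | cons x xs ih =>
    intro c p hs hc
    cases hs with
    | cons _ hs' => exact le_trans (ih c p hs' hc) (pvLcs_le_cons r p x xs)
    | cons₂ _ hs' =>
      have hok := pvChainOk_head r p _ _ hc
      have htail := pvChainOk_tail r p _ _ hc
      have := ih _ (some x) hs' htail
      simp only [pvLcs, hok, if_true, List.length_cons]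
      omega

theorem pvLcs_wit {α : Type} (r : α → α → Bool) :
    ∀ (l : List α) (p : Option α), ∃ c, c.Sublist l ∧ pvChainOk r p c ∧ c.length = pvLcs r p l := by
  intro l
  induction l with
  | nil => intro p; exact ⟨[], List.Sublist.refl _, pvChainOk_nil r p, rfl⟩
  | cons x xs ih =>
    intro p
    by_cases hok : pvOk r p x = true
    · obtain ⟨c1, hs1, hc1, hl1⟩ := ih (some x)
      obtain ⟨c2, hs2, hc2, hl2⟩ := ih p
      by_cases hcmp : pvLcs r p xs ≤ 1 + pvLcs r (some x) xs
      · refine ⟨x :: c1, List.Sublist.cons₂ x hs1, pvChainOk_cons r p x c1 hok hc1, ?_⟩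
        simp only [pvLcs, hok, if_true, List.length_cons]
        omega
      · refine ⟨c2, List.Sublist.cons x hs2, hc2, ?_⟩
        simp only [pvLcs, hok, if_true]
        omega
    · obtain ⟨c2, hs2, hc2, hl2⟩ := ih p
      refine ⟨c2, List.Sublist.cons x hs2, hc2, ?_⟩
      simp only [pvLcs, hok]
      exact hl2

theorem pvLcs_none_cons {α : Type} (r : α → α → Bool) (x : α) (xs : List α) :
    pvLcs r none (x :: xs) = max (1 + pvLcs r (some x) xs) (pvLcs r none xs) := by
  simp [pvLcs, pvOk]

-- ---------- order-invariance of the longest chain ----------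

theorem pvChain_sublist {α : Type} [DecidableEq α] (r : α → α → Bool)
    (hirr : ∀ a, r a a = false) :
    ∀ (l c : List α), c.Subperm l → c.Pairwise (fun a b => r a b = true) →
      l.Pairwise (fun a b => r b a = false) → c.Sublist l := by
  intro l
  induction l with
  | nil => intro c hsp _ _; simp [List.subperm_nil.mp hsp]
  | cons a t ih =>
    intro c hsp hcp hlp
    cases c with
    | nil => exact List.nil_sublist _
    | cons x c' =>
      by_cases hxa : x = a
      · subst hxa
        have h1 : c'.Subperm t := (List.subperm_cons x).mp hsp
        have := ih c' h1 hcp.of_cons (List.Pairwise.of_cons hlp)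
        exact List.Sublist.cons₂ x this
      · -- a cannot occur in x :: c' at all
        have hanotc : a ∉ x :: c' := by
          intro hmem
          rcases List.mem_cons.mp hmem with hh | hh
          · exact hxa hh.symm
          · -- x is before a in the chain, so r x a = true; but x ∈ t and l-pairwise forbids it
            have hrxa : r x a = true := (List.pairwise_cons.mp hcp).1 a hh
            have hxmem : x ∈ a :: t := hsp.subset (List.mem_cons_self)
            have hxt : x ∈ t := by
              rcases List.mem_cons.mp hxmem with hh2 | hh2
              · exact absurd hh2 hxa
              · exact hh2
            have := (List.pairwise_cons.mp hlp).1 x hxt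
            rw [this] at hrxa
            exact Bool.noConfusion hrxa
        have hsp' : (x :: c').Subperm t := by
          rw [List.subperm_ext_iff] at hsp ⊢
          intro y hy
          have h0 := hsp y hy
          have hya : ¬ (a = y) := fun h => hanotc (h ▸ hy)
          simp only [List.count_cons, beq_iff_eq, hya, if_false] at h0 ⊢
          omega
        exact List.Sublist.cons a (ih _ hsp' hcp (List.Pairwise.of_cons hlp))

theorem pvChainOk_none_iff {α : Type} (r : α → α → Bool) (c : List α) :
    pvChainOk r none c ↔ List.IsChain (fun a b => r a b = true) c := Iff.rfl

theorem pvLcs_eq_of_perm {α : Type} [DecidableEq α] (r : α → α → Bool)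
    (hirr : ∀ a, r a a = false)
    (htr : ∀ a b c, r a b = true → r b c = true → r a c = true)
    (l l' : List α) (hp : l.Perm l')
    (h1 : l.Pairwise (fun a b => r b a = false))
    (h2 : l'.Pairwise (fun a b => r b a = false)) :
    pvLcs r none l = pvLcs r none l' := by
  have key : ∀ (u v : List α), u.Perm v → v.Pairwise (fun a b => r b a = false) →
      pvLcs r none u ≤ pvLcs r none v := by
    intro u v hperm hvp
    obtain ⟨c, hs, hc, hl⟩ := pvLcs_wit r u none
    rw [pvChainOk_none_iff] at hc
    have hcp : c.Pairwise (fun a b => r a b = true) := by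
      have : Trans (fun a b => r a b = true) (fun a b => r a b = true) (fun a b => r a b = true) :=
        ⟨fun hab hbc => htr _ _ _ hab hbc⟩
      exact List.isChain_iff_pairwise.mp hc
    have hsub : c.Subperm v := hs.subperm.trans hperm.subperm
    have hcs : c.Sublist v := pvChain_sublist r hirr v c hsub hcp hvp
    have := pvLcs_le r v c none hcs (by rw [pvChainOk_none_iff]; exact hcp.isChain)
    omega
  exact le_antisymm (key l l' hp h2) (key l' l hp.symm h1)

theorem pvIsChain_congr {α : Type} (r r' : α → α → Bool) (Q : α → α → Prop)
    (hagree : ∀ a b, Q a b → r a b = r' a b) :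
    ∀ (c : List α), c.Pairwise Q → List.IsChain (fun a b => r a b = true) c →
      List.IsChain (fun a b => r' a b = true) c := by
  intro c
  induction c with
  | nil => intro _ _; exact List.IsChain.nil
  | cons x cs ih =>
    intro hq hc
    cases cs with
    | nil => exact List.IsChain.singleton _
    | cons y ys =>
      rw [List.isChain_cons_cons] at hc ⊢
      refine ⟨?_, ih hq.of_cons hc.2⟩
      rw [← hagree x y ((List.pairwise_cons.mp hq).1 y List.mem_cons_self)]
      exact hc.1

theorem pvLcs_congr_rel {α : Type} (r r' : α → α → Bool) (Q : α → α → Prop)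
    (l : List α) (hl : l.Pairwise Q) (hagree : ∀ a b, Q a b → r a b = r' a b) :
    pvLcs r none l = pvLcs r' none l := by
  have key : ∀ (s s' : α → α → Bool), (∀ a b, Q a b → s a b = s' a b) →
      pvLcs s none l ≤ pvLcs s' none l := by
    intro s s' hag
    obtain ⟨c, hs, hc, hlen⟩ := pvLcs_wit s l none
    rw [pvChainOk_none_iff] at hc
    have hcq : c.Pairwise Q := hl.sublist hs
    have hc' := pvIsChain_congr s s' Q hag c hcq hc
    have := pvLcs_le s' l c none hs (by rw [pvChainOk_none_iff]; exact hc')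
    omega
  exact le_antisymm (key r r' hagree) (key r' r (fun a b hq => (hagree a b hq).symm))

theorem pvLcs_reverse {α : Type} (r : α → α → Bool) (l : List α) :
    pvLcs r none l = pvLcs (fun a b => r b a) none l.reverse := by
  have key : ∀ (u v : List α) (s : α → α → Bool), u.reverse = v →
      pvLcs s none u ≤ pvLcs (fun a b => s b a) none v := by
    intro u v s hv
    obtain ⟨c, hs, hc, hlen⟩ := pvLcs_wit s u none
    rw [pvChainOk_none_iff] at hc
    have hs' : c.reverse.Sublist v := hv ▸ hs.reverse
    have hc' : List.IsChain (fun a b => s b a = true) c.reverse := by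
      rw [List.isChain_reverse]; exact hc
    have := pvLcs_le (fun a b => s b a) v c.reverse none hs'
      (by rw [pvChainOk_none_iff]; exact hc')
    simpa [hlen] using this
  refine le_antisymm (key l l.reverse r rfl) ?_
  have := key l.reverse l (fun a b => r b a) (List.reverse_reverse l)
  simpa using this


-- ---------- A side: the index DP computes the longest chain ----------

def pvP (e : List Int) : Int × Int := (PySem.List.pyGetD e 0 0, PySem.List.pyGetD e 1 0)

def pvPick {α : Type} (r : α → α → Bool) (x : α) : List α → Nat
  | [] => 0
  | y :: ys => if r x y then max (1 + pvLcs r (some y) ys) (pvPick r x ys) else pvPick r x ys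

theorem pvLcs_some_eq_pick {α : Type} (r : α → α → Bool) (x : α) :
    ∀ l, pvLcs r (some x) l = pvPick r x l := by
  intro l
  induction l with
  | nil => rfl
  | cons y ys ih =>
    simp only [pvLcs, pvOk, pvPick, ih]

def pvInnerVal (x : Int × Int) : List (Int × Int) → Int → Int
  | [], acc => acc
  | y :: ys, acc =>
      pvInnerVal x ys (if pvR2 x y then max acc (2 + (pvLcs pvR2 (some y) ys : Int)) else acc)

theorem pvInnerVal_eq (x : Int × Int) :
    ∀ (s : List (Int × Int)) (acc : Int), 1 ≤ acc →
      pvInnerVal x s acc = max acc (1 + (pvPick pvR2 x s : Int)) := by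
  intro s
  induction s with
  | nil => intro acc h; simp [pvInnerVal, pvPick]; omega
  | cons y ys ih =>
    intro acc h
    simp only [pvInnerVal, pvPick]
    by_cases hr : pvR2 x y = true
    · rw [if_pos hr, if_pos hr, ih _ (le_trans h (le_max_left _ _))]
      push_cast
      omega
    · rw [if_neg hr, if_neg hr, ih _ h]

theorem pvInnerVal_one (x : Int × Int) (s : List (Int × Int)) :
    pvInnerVal x s 1 = 1 + (pvLcs pvR2 (some x) s : Int) := by
  rw [pvInnerVal_eq x s 1 le_rfl, pvLcs_some_eq_pick]
  omega

def pvDval (m : List (Int × Int)) (k : Nat) : Int :=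
  1 + (pvLcs pvR2 (some (m.getD k (0, 0))) (m.drop (k + 1)) : Int)

def pvDp (m : List (Int × Int)) (t : Int) : List Int :=
  (List.range m.length).map (fun (k : Nat) => if t < (k : Int) then pvDval m k else 1)

theorem pvDp_length (m : List (Int × Int)) (t : Int) : (pvDp m t).length = m.length := by
  simp [pvDp]

theorem pvDp_getD (m : List (Int × Int)) (t : Int) (k : Nat) (hk : k < m.length) :
    (pvDp m t).getD k 0 = if t < (k : Int) then pvDval m k else 1 := by
  rw [List.getD_eq_getElem _ _ (by simpa [pvDp] using hk)]
  simp [pvDp]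

theorem pvM_getD (lis : List (List Int)) (k : Nat) (hk : k < lis.length) :
    (lis.map pvP).getD k (0, 0) = pvP (lis.getD k []) := by
  rw [List.getD_eq_getElem _ _ (by simpa using hk), List.getD_eq_getElem _ _ hk]
  simp

theorem pvGetD_set_ne (dp : List Int) (i k : Nat) (v : Int) (h : i ≠ k) :
    (dp.set i v).getD k 0 = dp.getD k 0 := by
  simp [List.getD, List.getElem?_set_ne h]

theorem pvGetD_set_self (dp : List Int) (i : Nat) (v : Int) (h : i < dp.length) :
    (dp.set i v).getD i 0 = v := by
  rw [List.getD_eq_getElem _ _ (by simpa using h)]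
  simp [List.getElem_set_self]


theorem pvA_inner (lis : List (List Int)) :
    ∀ (fuel : Nat) (t i : Int) (dp : List Int),
      0 ≤ i → i < t → t ≤ (lis.length : Int) → fuel = ((lis.length : Int) - t).toNat →
      dp.length = lis.length →
      (∀ k : Nat, i < (k : Int) → k < lis.length →
        dp.getD k 0 = pvDval (lis.map pvP) k) →
      1 ≤ dp.getD i.toNat 0 →
      (PySem.List.pyRange t (lis.length : Int) 1).foldl
        (fun dp j =>
          if PySem.List.pyGetD (PySem.List.pyGetD lis i []) 0 0 < PySem.List.pyGetD (PySem.List.pyGetD lis j []) 0 0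
              ∧ PySem.List.pyGetD (PySem.List.pyGetD lis i []) 1 0 < PySem.List.pyGetD (PySem.List.pyGetD lis j []) 1 0
          then PySem.List.pySetD dp i (max (PySem.List.pyGetD dp i 0) (1 + PySem.List.pyGetD dp j 0))
          else dp) dp
      = dp.set i.toNat
          (pvInnerVal ((lis.map pvP).getD i.toNat (0, 0)) ((lis.map pvP).drop t.toNat)
            (dp.getD i.toNat 0)) := by
  intro fuel
  induction fuel with
  | zero =>
    intro t i dp h0i hit htn hfuel hlen hinv hacc
    have htn' : t = (lis.length : Int) := by omega
    rw [PySem.List.pyRange_one_eq_nil (by omega)]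
    have hdrop : ((lis.map pvP).drop t.toNat) = [] := by
      apply List.drop_eq_nil_of_le
      simp [htn']
    rw [hdrop]
    simp only [pvInnerVal, List.foldl_nil]
    have hi : i.toNat < dp.length := by omega
    rw [List.getD_eq_getElem _ _ hi, List.set_getElem_self]
  | succ f ih =>
    intro t i dp h0i hit htn hfuel hlen hinv hacc
    have htlt : t < (lis.length : Int) := by omega
    rw [PySem.List.pyRange_one_cons htlt, List.foldl_cons]
    have h0t : 0 ≤ t := by omega
    have htl : t.toNat < lis.length := by omega
    have hml : (lis.map pvP).length = lis.length := by simp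
    have hmt : t.toNat < (lis.map pvP).length := by omega
    have hil : i.toNat < lis.length := by omega
    -- the tested condition is pvR2 on the mapped pairs
    have hgi : PySem.List.pyGetD lis i [] = lis.getD i.toNat [] := by
      rw [PySem.List.pyGetD_eq_getElem lis [] h0i (by exact_mod_cast (by omega : i < (lis.length : Int))),
        List.getD_eq_getElem _ _ hil]
    have hgt : PySem.List.pyGetD lis t [] = lis.getD t.toNat [] := by
      rw [PySem.List.pyGetD_eq_getElem lis [] h0t (by exact_mod_cast htlt), List.getD_eq_getElem _ _ htl]
    have hcond : (PySem.List.pyGetD (PySem.List.pyGetD lis i []) 0 0 < PySem.List.pyGetD (PySem.List.pyGetD lis t []) 0 0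
        ∧ PySem.List.pyGetD (PySem.List.pyGetD lis i []) 1 0 < PySem.List.pyGetD (PySem.List.pyGetD lis t []) 1 0)
        ↔ pvR2 ((lis.map pvP).getD i.toNat (0, 0)) ((lis.map pvP).getD t.toNat (0, 0)) = true := by
      rw [pvM_getD lis i.toNat hil, pvM_getD lis t.toNat htl, hgi, hgt]
      simp [pvR2, pvP]
    have hdropt : (lis.map pvP).drop t.toNat
        = (lis.map pvP).getD t.toNat (0, 0) :: (lis.map pvP).drop (t.toNat + 1) := by
      rw [List.getD_eq_getElem _ _ hmt]
      exact List.drop_eq_getElem_cons hmt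
    have htt1 : (t + 1).toNat = t.toNat + 1 := by omega
    have hdpt : PySem.List.pyGetD dp t 0 = pvDval (lis.map pvP) t.toNat := by
      rw [PySem.List.pyGetD_eq_getElem dp (0 : Int) h0t (by rw [hlen]; exact_mod_cast htlt),
        ← List.getD_eq_getElem _ _ (by omega : t.toNat < dp.length)]
      exact hinv t.toNat (by omega) htl
    have hdpi : PySem.List.pyGetD dp i 0 = dp.getD i.toNat 0 := by
      rw [PySem.List.pyGetD_eq_getElem dp (0 : Int) h0i (by rw [hlen]; exact_mod_cast (by omega : i < (lis.length : Int))),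
        List.getD_eq_getElem _ _ (by omega : i.toNat < dp.length)]
    by_cases hc : (PySem.List.pyGetD (PySem.List.pyGetD lis i []) 0 0 < PySem.List.pyGetD (PySem.List.pyGetD lis t []) 0 0
        ∧ PySem.List.pyGetD (PySem.List.pyGetD lis i []) 1 0 < PySem.List.pyGetD (PySem.List.pyGetD lis t []) 1 0)
    · rw [if_pos hc]
      have hr2 : pvR2 ((lis.map pvP).getD i.toNat (0, 0)) ((lis.map pvP).getD t.toNat (0, 0)) = true :=
        hcond.mp hc
      set acc := dp.getD i.toNat 0 with hacc_def
      set v := max acc (1 + pvDval (lis.map pvP) t.toNat) with hv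
      have hsetd : PySem.List.pySetD dp i (max (PySem.List.pyGetD dp i 0) (1 + PySem.List.pyGetD dp t 0))
          = dp.set i.toNat v := by
        rw [PySem.List.pySetD_of_nonneg dp _ h0i, hdpi, hdpt]
      rw [hsetd]
      have hres := ih (t + 1) i (dp.set i.toNat v) h0i (by omega) (by omega) (by omega)
        (by simpa using hlen)
        (by
          intro k hk1 hk2
          rw [pvGetD_set_ne dp i.toNat k v (by omega)]
          exact hinv k (by omega) hk2)
        (by
          rw [pvGetD_set_self dp i.toNat v (by omega)]
          calc (1 : Int) ≤ acc := hacc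
          _ ≤ v := le_max_left _ _)
      rw [hres, List.set_set, pvGetD_set_self dp i.toNat v (by omega)]
      congr 1
      rw [hdropt]
      simp only [pvInnerVal, hr2, if_true, htt1]
      congr 1
      rw [hv]
      unfold pvDval
      omega
    · rw [if_neg hc]
      have hr2 : ¬ (pvR2 ((lis.map pvP).getD i.toNat (0, 0)) ((lis.map pvP).getD t.toNat (0, 0)) = true) :=
        fun h => hc (hcond.mpr h)
      have hres := ih (t + 1) i dp h0i (by omega) (by omega) (by omega) hlen hinv hacc
      rw [hres]
      congr 1
      rw [hdropt]
      simp only [pvInnerVal, hr2, if_false, htt1]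
      simp


theorem pvDp_neg_one (m : List (Int × Int)) :
    pvDp m (-1) = (List.range m.length).map (fun k => pvDval m k) := by
  unfold pvDp
  apply List.map_congr_left
  intro k _
  rw [if_pos (by omega : (-1 : Int) < (k : Int))]

theorem pvA_outer (lis : List (List Int)) :
    ∀ (fuel : Nat) (t : Int), -1 ≤ t → t < (lis.length : Int) → fuel = (t + 1).toNat →
      (PySem.List.pyRange t (-1) (-1)).foldl
        (fun dp i =>
          (PySem.List.pyRange (i + 1) (lis.length : Int) 1).foldl
            (fun dp j =>
              if PySem.List.pyGetD (PySem.List.pyGetD lis i []) 0 0 < PySem.List.pyGetD (PySem.List.pyGetD lis j []) 0 0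
                  ∧ PySem.List.pyGetD (PySem.List.pyGetD lis i []) 1 0 < PySem.List.pyGetD (PySem.List.pyGetD lis j []) 1 0
              then PySem.List.pySetD dp i (max (PySem.List.pyGetD dp i 0) (1 + PySem.List.pyGetD dp j 0))
              else dp) dp) (pvDp (lis.map pvP) t)
      = pvDp (lis.map pvP) (-1) := by
  intro fuel
  induction fuel with
  | zero =>
    intro t h1t htn hfuel
    have : t = -1 := by omega
    subst this
    rw [PySem.List.pyRange_neg_one_eq_nil le_rfl, List.foldl_nil]
  | succ f ih =>
    intro t h1t htn hfuel
    have h0t : 0 ≤ t := by omega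
    rw [PySem.List.pyRange_neg_one_cons (by omega : (-1 : Int) < t), List.foldl_cons]
    have hml : (lis.map pvP).length = lis.length := by simp
    have htl : t.toNat < lis.length := by omega
    have hget1 : (pvDp (lis.map pvP) t).getD t.toNat 0 = 1 := by
      rw [pvDp_getD _ _ _ (by omega), if_neg (by omega)]
    have hstep := pvA_inner lis ((lis.length : Int) - (t + 1)).toNat (t + 1) t (pvDp (lis.map pvP) t)
      h0t (by omega) (by omega) rfl (by rw [pvDp_length, hml])
      (by
        intro k hk1 hk2
        rw [pvDp_getD _ _ _ (by omega), if_pos hk1])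
      (by rw [hget1])
    have hbeta : (PySem.List.pyRange (t + 1) (lis.length : Int) 1).foldl
            (fun dp j =>
              if PySem.List.pyGetD (PySem.List.pyGetD lis t []) 0 0 < PySem.List.pyGetD (PySem.List.pyGetD lis j []) 0 0
                  ∧ PySem.List.pyGetD (PySem.List.pyGetD lis t []) 1 0 < PySem.List.pyGetD (PySem.List.pyGetD lis j []) 1 0
              then PySem.List.pySetD dp t (max (PySem.List.pyGetD dp t 0) (1 + PySem.List.pyGetD dp j 0))
              else dp) (pvDp (lis.map pvP) t)
        = pvDp (lis.map pvP) (t - 1) := by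
      rw [hstep, hget1, pvInnerVal_one]
      have htt1 : (t + 1).toNat = t.toNat + 1 := by omega
      apply List.ext_getElem
      · simp [pvDp]
      · intro k hk1 hk2
        rw [List.getElem_set]
        have hk : k < (lis.map pvP).length := by simpa [pvDp] using hk2
        by_cases hkt : t.toNat = k
        · subst hkt
          rw [if_pos rfl]
          simp only [pvDp, List.getElem_map, List.getElem_range]
          rw [if_pos (by omega : t - 1 < (t.toNat : Int))]
          unfold pvDval
          rw [htt1, List.getD_eq_getElem _ _ (by omega)]
        · rw [if_neg hkt]
          simp only [pvDp, List.getElem_map, List.getElem_range]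
          have heq : (t < (k : Int)) ↔ (t - 1 < (k : Int)) := by omega
          rw [if_congr heq rfl rfl]
    rw [hbeta]
    exact ih (t - 1) (by omega) (by omega) (by omega)

def pvDvals : List (Int × Int) → List Int
  | [] => []
  | x :: xs => (1 + (pvLcs pvR2 (some x) xs : Int)) :: pvDvals xs

theorem pvDvals_eq_pvDp : ∀ m : List (Int × Int), pvDvals m = pvDp m (-1) := by
  intro m
  induction m with
  | nil => rfl
  | cons x xs ih =>
    rw [pvDp_neg_one]
    simp only [List.length_cons, List.range_succ_eq_map, List.map_cons, List.map_map]
    have h0 : pvDval (x :: xs) 0 = 1 + (pvLcs pvR2 (some x) xs : Int) := by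
      simp [pvDval]
    have hsucc : ∀ k : Nat, pvDval (x :: xs) (k + 1) = pvDval xs k := by
      intro k
      simp [pvDval]
    simp only [pvDvals, h0, ih, pvDp_neg_one]
    show (1 + (pvLcs pvR2 (some x) xs : Int)) :: (List.range xs.length).map (fun k => pvDval xs k)
      = pvDval (x :: xs) 0 :: (List.range xs.length).map (fun k => pvDval (x :: xs) (k + 1))
    rw [h0]
    congr 1

theorem pvFoldl_max_dvals : ∀ (xs : List (Int × Int)) (a : Int), 1 ≤ a →
    (pvDvals xs).foldl max a = max a (pvLcs pvR2 none xs : Int) := by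
  intro xs
  induction xs with
  | nil => intro a h; simp [pvDvals, pvLcs]; omega
  | cons y ys ih =>
    intro a h
    simp only [pvDvals, List.foldl_cons]
    rw [ih _ (le_trans h (le_max_left _ _)), pvLcs_none_cons]
    push_cast
    rw [max_assoc]

theorem pvA_max (m : List (Int × Int)) (hm : m ≠ []) :
    (PySem.List.max? (pvDp m (-1)) (fun y => y)).getD 0 = (pvLcs pvR2 none m : Int) := by
  rw [← pvDvals_eq_pvDp]
  cases m with
  | nil => exact absurd rfl hm
  | cons x xs =>
    simp only [pvDvals]
    rw [PySem.List.max?_id_cons, Option.getD_some]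
    rw [pvFoldl_max_dvals xs _ (by
      have : (0 : Int) ≤ (pvLcs pvR2 (some x) xs : Int) := by positivity
      omega)]
    rw [pvLcs_none_cons]
    push_cast
    omega


theorem pvDp_init (lis : List (List Int)) :
    (PySem.List.pyRange 0 (lis.length : Int) 1).map (fun _ => (1 : Int))
      = pvDp (lis.map pvP) ((lis.length : Int) - 2) := by
  rw [PySem.List.pyRange_one]
  simp only [sub_zero, Int.toNat_natCast, List.map_map, pvDp, List.length_map]
  apply List.map_congr_left
  intro k hk
  rw [List.mem_range] at hk
  by_cases hkk : (lis.length : Int) - 2 < (k : Int)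
  · rw [if_pos hkk]
    have hk1 : k + 1 = lis.length := by omega
    unfold pvDval
    rw [show k + 1 = (lis.map pvP).length by simpa using hk1, List.drop_length]
    simp [pvLcs]
  · rw [if_neg hkk]
    rfl

theorem pvA_value (envelopes : List (List Int)) (h : envelopes ≠ []) :
    max_layers envelopes
      = (pvLcs pvR2 none ((PySem.List.sorted envelopes
          (fun x => PySem.List.pyGetD x 0 0 + PySem.List.pyGetD x 1 0)).map pvP) : Int) := by
  simp only [max_layers, PySem.List.len_eq]
  set lis := PySem.List.sorted envelopes
      (fun x => PySem.List.pyGetD x 0 0 + PySem.List.pyGetD x 1 0) with hlis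
  have hne : lis ≠ [] := by
    rw [hlis, Ne, PySem.List.sorted_eq_nil_iff]
    exact h
  have hlpos : 0 < lis.length := List.length_pos_iff.mpr hne
  rw [if_neg (by simpa using (by omega : ¬ ((lis.length : Int) = 0)))]
  rw [pvDp_init lis]
  rw [pvA_outer lis (((lis.length : Int) - 2) + 1).toNat ((lis.length : Int) - 2)
    (by omega) (by omega) rfl]
  exact pvA_max (lis.map pvP) (by simpa using hne)


-- ---------- B side: the forward height-LIS fold computes the longest chain ----------

def pvSeenR : List (Int × Int) → List (Int × Int)
  | [] => []
  | x :: rp => (x.2, 1 + (pvLcs pvRF (some x) rp : Int)) :: pvSeenR rp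

theorem pvSeenR_snd_pos : ∀ (rp : List (Int × Int)) (p : Int × Int), p ∈ pvSeenR rp → 1 ≤ p.2 := by
  intro rp
  induction rp with
  | nil => intro p hp; simp [pvSeenR] at hp
  | cons x t ih =>
    intro p hp
    rcases List.mem_cons.mp hp with h | h
    · subst h
      have : (0 : Int) ≤ (pvLcs pvRF (some x) t : Int) := by positivity
      simpa using by omega
    · exact ih p h

theorem pvFoldl_max_comm (l : List Int) : ∀ a b : Int, l.foldl max (max a b) = max (l.foldl max a) b := by
  induction l with
  | nil => intro a b; rfl
  | cons x t ih =>
    intro a b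
    simp only [List.foldl_cons]
    rw [max_right_comm a b x, ih]

theorem pvFoldl_max_reverse (l : List Int) : ∀ a : Int, l.reverse.foldl max a = l.foldl max a := by
  induction l with
  | nil => intro a; rfl
  | cons x t ih =>
    intro a
    rw [List.reverse_cons, List.foldl_append, ih]
    simp only [List.foldl_cons, List.foldl_nil]
    rw [← pvFoldl_max_comm]

theorem pvMaxD_id (xs : List Int) (h : ∀ v ∈ xs, 0 ≤ v) :
    PySem.List.maxD xs (fun y => y) 0 = xs.foldl max 0 := by
  cases xs with
  | nil => rfl
  | cons x t =>
    unfold PySem.List.maxD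
    rw [PySem.List.max?_id_cons, Option.getD_some]
    simp only [List.foldl_cons]
    rw [max_eq_right (h x List.mem_cons_self)]

theorem pvBestLT (x : Int × Int) : ∀ (rp : List (Int × Int)),
    (((pvSeenR rp).filter (fun s => decide (s.1 < x.2))).map (fun s => s.2)).foldl max 0
      = (pvLcs pvRF (some x) rp : Int) := by
  intro rp
  induction rp with
  | nil => simp [pvSeenR, pvLcs]
  | cons y t ih =>
    simp only [pvSeenR, List.filter_cons]
    by_cases hy : y.2 < x.2
    · rw [if_pos (by simpa using hy)]
      simp only [List.map_cons, List.foldl_cons]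
      have hpos : (0 : Int) ≤ (pvLcs pvRF (some y) t : Int) := by positivity
      rw [max_eq_right (by omega : (0 : Int) ≤ 1 + (pvLcs pvRF (some y) t : Int))]
      rw [show ((1 + (pvLcs pvRF (some y) t : Int))) = max 0 (1 + (pvLcs pvRF (some y) t : Int)) from
        (max_eq_right (by omega)).symm]
      rw [pvFoldl_max_comm, ih]
      simp only [pvLcs, pvOk, pvRF]
      rw [if_pos (by simpa using hy)]
      push_cast
      omega
    · rw [if_neg (by simpa using hy)]
      rw [ih]
      simp only [pvLcs, pvOk, pvRF]
      rw [if_neg (by simpa using hy)]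

theorem pvRH_flip : (fun a b => pvRH b a) = pvRF := by
  funext a b
  simp [pvRH, pvRF]

theorem pvLcs_RH_reverse (l : List (Int × Int)) :
    pvLcs pvRH none l = pvLcs pvRF none l.reverse := by
  rw [pvLcs_reverse pvRH l, pvRH_flip]

theorem pvIfMax (a b : Int) : (if a < b then b else a) = max a b := by
  rcases lt_or_ge a b with h | h
  · rw [if_pos h, max_eq_right h.le]
  · rw [if_neg (by omega), max_eq_left h]

def pvBStep (st : Int × List (Int × Int)) (q : Int × Int) : Int × List (Int × Int) :=
  let cur : Int := 1 + PySem.List.maxD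
    ((st.2.filter (fun s => decide (s.1 < q.2))).map (fun s => s.2)) (fun y => y) 0
  (if st.1 < cur then cur else st.1, st.2 ++ [(q.2, cur)])

theorem pvBStep_applied (b : Int) (sn : List (Int × Int)) (q : Int × Int) :
    pvBStep (b, sn) q
      = (if b < 1 + PySem.List.maxD ((sn.filter (fun s => decide (s.1 < q.2))).map (fun s => s.2)) (fun y => y) 0
          then 1 + PySem.List.maxD ((sn.filter (fun s => decide (s.1 < q.2))).map (fun s => s.2)) (fun y => y) 0
          else b,
         sn ++ [(q.2, 1 + PySem.List.maxD ((sn.filter (fun s => decide (s.1 < q.2))).map (fun s => s.2)) (fun y => y) 0)]) := rfl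

theorem pvB_fold : ∀ (l pre : List (Int × Int)),
    l.foldl pvBStep ((pvLcs pvRH none pre : Int), (pvSeenR pre.reverse).reverse)
    = ((pvLcs pvRH none (pre ++ l) : Int), (pvSeenR (pre ++ l).reverse).reverse) := by
  intro l
  induction l with
  | nil => intro pre; rw [List.foldl_nil, List.append_nil]
  | cons q l' ih =>
    intro pre
    rw [List.foldl_cons, pvBStep_applied]
    have hcur : 1 + PySem.List.maxD
        ((((pvSeenR pre.reverse).reverse.filter (fun s => decide (s.1 < q.2))).map (fun s => s.2)))
        (fun y => y) 0
        = 1 + (pvLcs pvRF (some q) pre.reverse : Int) := by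
      rw [pvMaxD_id _ (by
        intro v hv
        rw [List.mem_map] at hv
        obtain ⟨p, hp, hv⟩ := hv
        have hp1 : p ∈ (pvSeenR pre.reverse).reverse := List.mem_of_mem_filter hp
        rw [List.mem_reverse] at hp1
        have := pvSeenR_snd_pos pre.reverse p hp1
        omega)]
      rw [List.filter_reverse, List.map_reverse, pvFoldl_max_reverse, pvBestLT]
    have hbest : (if (pvLcs pvRH none pre : Int) < 1 + (pvLcs pvRF (some q) pre.reverse : Int)
          then 1 + (pvLcs pvRF (some q) pre.reverse : Int) else (pvLcs pvRH none pre : Int))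
        = (pvLcs pvRH none (pre ++ [q]) : Int) := by
      rw [pvIfMax, pvLcs_RH_reverse (pre ++ [q]), List.reverse_append, List.reverse_singleton,
        List.singleton_append, pvLcs_none_cons, pvLcs_RH_reverse pre]
      push_cast
      rw [max_comm]
    have hseen : (pvSeenR pre.reverse).reverse ++ [(q.2, 1 + (pvLcs pvRF (some q) pre.reverse : Int))]
        = (pvSeenR (pre ++ [q]).reverse).reverse := by
      rw [List.reverse_append, List.reverse_singleton, List.singleton_append]
      simp [pvSeenR]
    rw [hcur, hbest, hseen, ih (pre ++ [q]), List.append_assoc, List.singleton_append]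

theorem pvB_value (envelopes : List (List Int)) :
    max_layers_alt envelopes
      = (pvLcs pvRH none (PySem.List.sorted2 (envelopes.map pvP) (fun p => p.1) (fun p => -p.2)) : Int) := by
  show (List.foldl pvBStep ((0 : Int), ([] : List (Int × Int)))
      (PySem.List.sorted2 (envelopes.map pvP) (fun p => p.1) (fun p => -p.2))).1 = _
  have h0 : ((0 : Int), ([] : List (Int × Int)))
      = ((pvLcs pvRH none ([] : List (Int × Int)) : Int),
         (pvSeenR ([] : List (Int × Int)).reverse).reverse) := by
    simp [pvLcs, pvSeenR]
  rw [h0, pvB_fold]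
  rw [List.nil_append]

-- ---------- the two sort orders are compatible with the chain relation ----------

theorem pvPairwise_insertBy {α : Type} (before : α → α → Bool)
    (hasym : ∀ a b, before a b = true → before b a = false)
    (htrans : ∀ a b c, before a b = true → before b c = true → before a c = true) :
    ∀ (l : List α) (x), l.Pairwise (fun a b => before b a = false) →
      (PySem.List.insertBy before x l).Pairwise (fun a b => before b a = false) := by
  intro l
  induction l with
  | nil =>
    intro x _
    simp [PySem.List.insertBy]
  | cons y ys ih =>
    intro x hp
    rw [List.pairwise_cons] at hp
    obtain ⟨hy, hys⟩ := hp
    by_cases hxy : before x y = true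
    · simp only [PySem.List.insertBy, hxy, if_true]
      rw [List.pairwise_cons]
      refine ⟨?_, by rw [List.pairwise_cons]; exact ⟨hy, hys⟩⟩
      intro z hz
      rcases List.mem_cons.mp hz with h | h
      · subst h; exact hasym x z hxy
      · cases hzx : before z x
        · rfl
        · exact absurd (htrans z x y hzx hxy) (by rw [hy z h]; simp)
    · have hxy' : before x y = false := by simpa using hxy
      simp only [PySem.List.insertBy, hxy', Bool.false_eq_true, if_false]
      rw [List.pairwise_cons]
      refine ⟨?_, ih x hys⟩
      intro z hz
      rcases (PySem.List.mem_insertBy before x z ys).mp hz with h | h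
      · subst h
        simpa using hxy
      · exact hy z h

theorem pvPairwise_foldl_insertBy {α : Type} (before : α → α → Bool)
    (hasym : ∀ a b, before a b = true → before b a = false)
    (htrans : ∀ a b c, before a b = true → before b c = true → before a c = true) :
    ∀ (xs acc : List α), acc.Pairwise (fun a b => before b a = false) →
      (xs.foldl (fun acc x => PySem.List.insertBy before x acc) acc).Pairwise
        (fun a b => before b a = false) := by
  intro xs
  induction xs with
  | nil => intro acc h; exact h
  | cons x xs ih =>
    intro acc h
    rw [List.foldl_cons]
    exact ih _ (pvPairwise_insertBy before hasym htrans acc x h)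

theorem pvSorted2_pairwise (xs : List (Int × Int)) :
    (PySem.List.sorted2 xs (fun p => p.1) (fun p => -p.2)).Pairwise
      (fun a b => a.1 < b.1 ∨ (a.1 = b.1 ∧ b.2 ≤ a.2)) := by
  have h := pvPairwise_foldl_insertBy
    (fun (a b : Int × Int) => decide (a.1 < b.1) || (!decide (b.1 < a.1) && decide (-a.2 < -b.2)))
    (by intro a b hab; simp at hab ⊢; omega)
    (by intro a b c hab hbc; simp at hab hbc ⊢; omega)
    xs [] List.Pairwise.nil
  refine List.Pairwise.imp ?_ h
  intro a b hab
  simp at hab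
  omega


theorem pvR2_irrefl : ∀ a : Int × Int, pvR2 a a = false := by
  intro a; simp [pvR2]

theorem pvR2_trans : ∀ a b c : Int × Int, pvR2 a b = true → pvR2 b c = true → pvR2 a c = true := by
  intro a b c hab hbc
  simp [pvR2] at hab hbc ⊢
  omega

-- ===== VERDICT (by name: the statement is the Claim_ definition above) =====
theorem max_layers_spec : Claim_equal_max_layers := by
  unfold Claim_equal_max_layers
  intro env _ _
  unfold Spec_max_layers
  by_cases henv : env = []
  · subst henv; rfl
  · rw [pvA_value env henv, pvB_value env]
    congr 1
    have hQB := pvSorted2_pairwise (env.map pvP)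
    have h1 : pvLcs pvRH none (PySem.List.sorted2 (env.map pvP) (fun p => p.1) (fun p => -p.2))
        = pvLcs pvR2 none (PySem.List.sorted2 (env.map pvP) (fun p => p.1) (fun p => -p.2)) := by
      refine pvLcs_congr_rel pvRH pvR2 (fun a b => a.1 < b.1 ∨ (a.1 = b.1 ∧ b.2 ≤ a.2)) _ hQB ?_
      intro a b hq
      rcases hq with h | ⟨h1, h2⟩
      · simp [pvRH, pvR2, h]
      · simp [pvRH, pvR2]
        omega
    have hperm : ((PySem.List.sorted env
          (fun x => PySem.List.pyGetD x 0 0 + PySem.List.pyGetD x 1 0)).map pvP).Perm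
        (PySem.List.sorted2 (env.map pvP) (fun p => p.1) (fun p => -p.2)) := by
      refine ((PySem.List.sorted_perm env _ _).map pvP).trans ?_
      exact (PySem.List.sorted2_perm (env.map pvP) _ _ _).symm
    have htopo1 : ((PySem.List.sorted env
          (fun x => PySem.List.pyGetD x 0 0 + PySem.List.pyGetD x 1 0)).map pvP).Pairwise
        (fun a b => pvR2 b a = false) := by
      have hs := PySem.List.sorted_pairwise env
        (fun x => PySem.List.pyGetD x 0 0 + PySem.List.pyGetD x 1 0)
      refine List.Pairwise.map pvP ?_ hs
      intro a b hab
      simp only [pvR2, pvP]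
      simp only [pvP] at hab
      simp
      omega
    have htopo2 : (PySem.List.sorted2 (env.map pvP) (fun p => p.1) (fun p => -p.2)).Pairwise
        (fun a b => pvR2 b a = false) := by
      refine List.Pairwise.imp ?_ hQB
      intro a b hab
      simp [pvR2]
      omega
    rw [pvLcs_eq_of_perm pvR2 pvR2_irrefl pvR2_trans _ _ hperm htopo1 htopo2, h1]
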